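-- pv_equiv track=rewrite | github.com/Ayansyd/Docker_scan- | utils/format_utils.py | format_trivy_output
-- ===== SOURCE A (Python) =====
-- def format_trivy_output(raw_output):
--     """
--     Format Trivy's raw output for better readability.
--     """
--     formatted_output = []
--     for line in raw_output.splitlines():
--         if "CRITICAL" in line:
--             formatted_output.append(f"🚨 CRITICAL: {line}")
--         elif "HIGH" in line:
--             formatted_output.append(f"⚠️ HIGH: {line}")
--         elif "MEDIUM" in line:
--             formatted_output.append(f"⚡ MEDIUM: {line}")
--         elif "LOW" in line:
--             formatted_output.append(f"ℹ️ LOW: {line}")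
--         elif "CVE-" in line:
--             formatted_output.append(f"🔍 {line}")
--         elif "Total:" in line:
--             formatted_output.append(f"📊 {line}")
--         else:
--             formatted_output.append(line)
--     return "\n".join(formatted_output)
-- ===== SOURCE B (Python) =====
-- RULES = [
--     ("CRITICAL", "\U0001F6A8 CRITICAL: "),
--     ("HIGH", "\u26A0\uFE0F HIGH: "),
--     ("MEDIUM", "\u26A1 MEDIUM: "),
--     ("LOW", "\u2139\uFE0F LOW: "),
--     ("CVE-", "\U0001F50D "),
--     ("Total:", "\U0001F4CA "),
-- ]
--
--
-- def format_trivy_output(raw_output):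
--     """
--     Format Trivy's raw output for better readability.
--     """
--     # Rule-major staged passes: for each rule in order, sweep all lines once,
--     # annotating those not yet annotated; a done-flag preserves first-match precedence.
--     cells = [[False, line] for line in raw_output.splitlines()]
--     for keyword, prefix in RULES:
--         for cell in cells:
--             if not cell[0] and keyword in cell[1]:
--                 cell[0] = True
--                 cell[1] = prefix + cell[1]
--     return "\n".join(text for _, text in cells)
-- ===== Notes on version B (the rewrite author's own statement) =====
-- stated objective: alternative
-- what changed: Replaced the line-major if-elif cascade with rule-major staged passes: for each of the six rules in order, one sweep over all lines annotates the not-yet-annotated matching lines (a done-flag per line preserves first-match precedence), then the texts are joined.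
import Mathlib
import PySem

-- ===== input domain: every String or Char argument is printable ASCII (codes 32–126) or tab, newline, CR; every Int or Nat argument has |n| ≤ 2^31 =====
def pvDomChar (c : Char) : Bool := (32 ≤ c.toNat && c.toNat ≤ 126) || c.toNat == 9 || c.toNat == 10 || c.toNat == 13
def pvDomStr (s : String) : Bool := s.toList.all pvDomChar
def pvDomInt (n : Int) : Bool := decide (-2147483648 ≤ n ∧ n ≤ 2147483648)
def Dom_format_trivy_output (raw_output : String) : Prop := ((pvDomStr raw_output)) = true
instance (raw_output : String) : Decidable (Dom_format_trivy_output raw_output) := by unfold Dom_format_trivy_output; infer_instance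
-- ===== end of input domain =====

-- B replaces A's line-major if-elif cascade by rule-major staged passes over done-flagged cells (alternative decomposition, same cost).

-- ===== PORT A =====
def format_trivy_output (raw_output : String) : String :=
  let formatted_output : List String :=
    (PySem.Str.splitlines raw_output).foldl (fun acc line =>
      if PySem.Str.isIn "CRITICAL" line then acc ++ ["🚨 CRITICAL: " ++ line]
      else if PySem.Str.isIn "HIGH" line then acc ++ ["⚠️ HIGH: " ++ line]
      else if PySem.Str.isIn "MEDIUM" line then acc ++ ["⚡ MEDIUM: " ++ line]
      else if PySem.Str.isIn "LOW" line then acc ++ ["ℹ️ LOW: " ++ line]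
      else if PySem.Str.isIn "CVE-" line then acc ++ ["🔍 " ++ line]
      else if PySem.Str.isIn "Total:" line then acc ++ ["📊 " ++ line]
      else acc ++ [line]) []
  PySem.Str.join "\n" formatted_output

-- ===== PORT B =====
def pvRules : List (String × String) :=
  [("CRITICAL", "🚨 CRITICAL: "), ("HIGH", "⚠️ HIGH: "), ("MEDIUM", "⚡ MEDIUM: "),
   ("LOW", "ℹ️ LOW: "), ("CVE-", "🔍 "), ("Total:", "📊 ")]

-- one rule-major pass: sweep all cells, annotating the not-yet-done lines containing the keyword
def pvApplyRule (cells : List (Bool × String)) (rule : String × String) : List (Bool × String) :=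
  cells.map (fun c => if !c.1 && PySem.Str.isIn rule.1 c.2 then (true, rule.2 ++ c.2) else c)

def format_trivy_output_alt (raw_output : String) : String :=
  let cells : List (Bool × String) := (PySem.Str.splitlines raw_output).map (fun line => (false, line))
  let cells := pvRules.foldl pvApplyRule cells
  PySem.Str.join "\n" (cells.map Prod.snd)

-- ===== PRECONDITION & SPEC =====
def Spec_format_trivy_output (raw_output : String) (out : String) : Prop := out = format_trivy_output_alt raw_output
instance (raw_output : String) (out : String) : Decidable (Spec_format_trivy_output raw_output out) := by unfold Spec_format_trivy_output; infer_instance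

-- ===== CLAIM (what is proved, stated in full; the proofs are below) =====
def Claim_equal_format_trivy_output : Prop := ∀ (raw_output : String), Dom_format_trivy_output raw_output → Spec_format_trivy_output raw_output (format_trivy_output raw_output)

-- ===== LEMMAS AND PROOFS =====

-- the per-cell effect of one rule
def pvCellStep (c : Bool × String) (rule : String × String) : Bool × String :=
  if !c.1 && PySem.Str.isIn rule.1 c.2 then (true, rule.2 ++ c.2) else c

-- the rule-major sweeps commute into a per-cell fold of all rules (passes act cell-wise)
theorem pvFoldl_apply_eq_map (rules : List (String × String)) (cells : List (Bool × String)) :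
    rules.foldl pvApplyRule cells = cells.map (fun c => rules.foldl pvCellStep c) := by
  induction rules generalizing cells with
  | nil => simp
  | cons r rs ih =>
    simp only [List.foldl_cons, ih, pvApplyRule, List.map_map]
    rfl

-- per line, folding all six rules over a fresh cell computes exactly A's cascade result
theorem pvCell_cascade (line : String) :
    (pvRules.foldl pvCellStep (false, line)).2 =
    (if PySem.Str.isIn "CRITICAL" line then "🚨 CRITICAL: " ++ line
      else if PySem.Str.isIn "HIGH" line then "⚠️ HIGH: " ++ line
      else if PySem.Str.isIn "MEDIUM" line then "⚡ MEDIUM: " ++ line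
      else if PySem.Str.isIn "LOW" line then "ℹ️ LOW: " ++ line
      else if PySem.Str.isIn "CVE-" line then "🔍 " ++ line
      else if PySem.Str.isIn "Total:" line then "📊 " ++ line
      else line) := by
  simp only [pvRules, List.foldl_cons, List.foldl_nil]
  split_ifs with h1 h2 h3 h4 h5 h6 <;>
    simp only [pvCellStep, *, Bool.not_true, Bool.not_false,
      Bool.true_and, Bool.false_and, if_false, Bool.false_eq_true] <;> rfl

-- A's foldl-append loop is the map of its per-line cascade
theorem pvA_foldl_eq (lines : List String) (acc : List String) :
    lines.foldl (fun acc line =>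
      if PySem.Str.isIn "CRITICAL" line then acc ++ ["🚨 CRITICAL: " ++ line]
      else if PySem.Str.isIn "HIGH" line then acc ++ ["⚠️ HIGH: " ++ line]
      else if PySem.Str.isIn "MEDIUM" line then acc ++ ["⚡ MEDIUM: " ++ line]
      else if PySem.Str.isIn "LOW" line then acc ++ ["ℹ️ LOW: " ++ line]
      else if PySem.Str.isIn "CVE-" line then acc ++ ["🔍 " ++ line]
      else if PySem.Str.isIn "Total:" line then acc ++ ["📊 " ++ line]
      else acc ++ [line]) acc
    = acc ++ lines.map (fun line => (pvRules.foldl pvCellStep (false, line)).2) := by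
  induction lines generalizing acc with
  | nil => simp
  | cons l ls ih =>
    simp only [List.foldl_cons, List.map_cons, ih, pvCell_cascade]
    split_ifs <;> simp

-- ===== VERDICT (by name: the statement is the Claim_ definition above) =====
theorem format_trivy_output_spec : Claim_equal_format_trivy_output := by
  intro raw_output _
  unfold Spec_format_trivy_output format_trivy_output format_trivy_output_alt
  simp only [pvA_foldl_eq, pvFoldl_apply_eq_map, List.map_map, List.nil_append]
  rfl
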